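-- pv_equiv track=rewrite | github.com/SWCBTCKid/job-agent | matcher/embedder.py | _auto_bucket_skills
-- ===== SOURCE A (Python) =====
-- _BUCKET_MAP: list[tuple[str, list[str]]] = [
--     ("languages",   ["python", "go", "golang", "java", "c++", "cpp", "rust", "scala",
--                      "kotlin", "swift", "ruby", "javascript", "typescript", "php", "elixir"]),
--     ("systems",     ["linux", "unix", "embedded", "kernel", "rtos", "systems programming",
--                      "low-level", "operating system", "hardware-in-the-loop", "hil",
--                      "safety-critical", "real-time", "firmware"]),
--     ("distributed", ["distributed", "kubernetes", "k8s", "docker", "microservices", "kafka",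
--                      "grpc", "service mesh", "etcd", "zookeeper", "thrift", "rpc",
--                      "container orchestration", "over-the-air", "ota", "automated rollout",
--                      "automated deployment", "ci/cd", "continuous delivery", "configuration management",
--                      "chef", "ansible", "puppet", "conveyor", "tupperware"]),
--     ("reliability", ["observability", "monitoring", "alerting", "sre", "on-call", "incident",
--                      "reliability", "high availability", "site reliability"]),
--     ("security",    ["security", "authorization", "authentication", "access control", "iam",
--                      "zero trust", "acl", "policy enforcement", "packet analysis", "wireshark",
--                      "network analysis", "intrusion", "vulnerability"]),
--     ("scale",       ["infrastructure", "platform", "production", "fleet", "large-scale",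
--                      "hyperscale", "cloud", "distributed systems"]),
-- ]
--
-- def _auto_bucket_skills(skills: list[str]) -> dict[str, list[str]]:
--     """Assign Haiku-extracted skill strings into skill groups for Stage 1 matching."""
--     groups: dict[str, list[str]] = {}
--     unmatched: list[str] = []
--     for skill in skills:
--         skill_lower = skill.lower()
--         placed = False
--         for bucket, keywords in _BUCKET_MAP:
--             if any(kw in skill_lower for kw in keywords):
--                 groups.setdefault(bucket, []).append(skill)
--                 placed = True
--                 break
--         if not placed:
--             unmatched.append(skill)
--     if unmatched:
--         groups["other"] = unmatched
--     return groups if groups else {"other": skills}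
-- ===== SOURCE B (Python) =====
-- _BUCKET_MAP: list[tuple[str, list[str]]] = [
--     ("languages",   ["python", "go", "golang", "java", "c++", "cpp", "rust", "scala",
--                      "kotlin", "swift", "ruby", "javascript", "typescript", "php", "elixir"]),
--     ("systems",     ["linux", "unix", "embedded", "kernel", "rtos", "systems programming",
--                      "low-level", "operating system", "hardware-in-the-loop", "hil",
--                      "safety-critical", "real-time", "firmware"]),
--     ("distributed", ["distributed", "kubernetes", "k8s", "docker", "microservices", "kafka",
--                      "grpc", "service mesh", "etcd", "zookeeper", "thrift", "rpc",
--                      "container orchestration", "over-the-air", "ota", "automated rollout",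
--                      "automated deployment", "ci/cd", "continuous delivery", "configuration management",
--                      "chef", "ansible", "puppet", "conveyor", "tupperware"]),
--     ("reliability", ["observability", "monitoring", "alerting", "sre", "on-call", "incident",
--                      "reliability", "high availability", "site reliability"]),
--     ("security",    ["security", "authorization", "authentication", "access control", "iam",
--                      "zero trust", "acl", "policy enforcement", "packet analysis", "wireshark",
--                      "network analysis", "intrusion", "vulnerability"]),
--     ("scale",       ["infrastructure", "platform", "production", "fleet", "large-scale",
--                      "hyperscale", "cloud", "distributed systems"]),
-- ]
--
--
-- def _label(skill: str) -> str | None: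
--     """First bucket (in _BUCKET_MAP order) whose keyword occurs in skill.lower(), else None."""
--     skill_lower = skill.lower()
--     for bucket, keywords in _BUCKET_MAP:
--         if any(kw in skill_lower for kw in keywords):
--             return bucket
--     return None
--
--
-- def _auto_bucket_skills(skills: list[str]) -> dict[str, list[str]]:
--     labeled = [(_label(s), s) for s in skills]
--     # bucket names in order of first appearance among the labels
--     order: list[str] = []
--     for lb, _ in labeled:
--         if lb is not None and lb not in order:
--             order.append(lb)
--     groups = {b: [s for lb, s in labeled if lb == b] for b in order}
--     unmatched = [s for lb, s in labeled if lb is None]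
--     if unmatched or not groups:
--         groups["other"] = unmatched
--     return groups
-- ===== Notes on version B (the rewrite author's own statement) =====
-- stated objective: alternative
-- what changed: A builds the groups dict incrementally with setdefault/append inside one pass; B first labels every skill with its bucket (or None), then derives the key order from the labels and collects each bucket's skills by per-bucket filtering, appending 'other' at the end.
import Mathlib
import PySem

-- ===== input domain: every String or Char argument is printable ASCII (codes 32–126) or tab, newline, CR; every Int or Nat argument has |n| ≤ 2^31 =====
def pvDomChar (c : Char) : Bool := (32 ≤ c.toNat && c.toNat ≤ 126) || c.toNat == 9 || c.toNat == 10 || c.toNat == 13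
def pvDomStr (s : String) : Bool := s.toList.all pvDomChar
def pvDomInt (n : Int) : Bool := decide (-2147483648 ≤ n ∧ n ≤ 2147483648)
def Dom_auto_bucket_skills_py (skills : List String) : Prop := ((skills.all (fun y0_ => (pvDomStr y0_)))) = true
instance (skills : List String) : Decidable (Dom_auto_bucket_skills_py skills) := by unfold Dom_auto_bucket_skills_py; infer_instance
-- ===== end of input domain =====

-- B replaces A's one-pass dict-building loop by a label-then-group-by decomposition
-- (label every skill once, then collect each first-appearing bucket's skills); objective: alternative structure, same cost.

-- ===== PORT A =====
def bucketMap : List (String × List String) := [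
  ("languages",   ["python", "go", "golang", "java", "c++", "cpp", "rust", "scala",
                   "kotlin", "swift", "ruby", "javascript", "typescript", "php", "elixir"]),
  ("systems",     ["linux", "unix", "embedded", "kernel", "rtos", "systems programming",
                   "low-level", "operating system", "hardware-in-the-loop", "hil",
                   "safety-critical", "real-time", "firmware"]),
  ("distributed", ["distributed", "kubernetes", "k8s", "docker", "microservices", "kafka",
                   "grpc", "service mesh", "etcd", "zookeeper", "thrift", "rpc",
                   "container orchestration", "over-the-air", "ota", "automated rollout",
                   "automated deployment", "ci/cd", "continuous delivery", "configuration management",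
                   "chef", "ansible", "puppet", "conveyor", "tupperware"]),
  ("reliability", ["observability", "monitoring", "alerting", "sre", "on-call", "incident",
                   "reliability", "high availability", "site reliability"]),
  ("security",    ["security", "authorization", "authentication", "access control", "iam",
                   "zero trust", "acl", "policy enforcement", "packet analysis", "wireshark",
                   "network analysis", "intrusion", "vulnerability"]),
  ("scale",       ["infrastructure", "platform", "production", "fleet", "large-scale",
                   "hyperscale", "cloud", "distributed systems"])]

-- A's inner `for bucket, keywords in _BUCKET_MAP: … break` loop (placed-flag + break = Option result)
def firstBucketA (skill_lower : String) : List (String × List String) → Option String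
  | [] => none
  | (bucket, keywords) :: rest =>
    if keywords.any (fun kw => PySem.Str.isIn kw skill_lower) then some bucket
    else firstBucketA skill_lower rest

-- A's loop body over one skill: state = (groups, unmatched)
def stepA (st : PySem.Dict String (List String) × List String) (skill : String) :
    PySem.Dict String (List String) × List String :=
  let skill_lower := PySem.Str.lower skill
  match firstBucketA skill_lower bucketMap with
  | some bucket => (st.1.modify bucket [] (fun g => g ++ [skill]), st.2)  -- groups.setdefault(bucket, []).append(skill)
  | none => (st.1, st.2 ++ [skill])

def auto_bucket_skills_py (skills : List String) : List (String × List String) :=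
  let st := skills.foldl stepA (PySem.Dict.mk [], [])
  let groups := if st.2 ≠ [] then st.1.insert "other" st.2 else st.1
  if groups.items ≠ [] then groups.items else [("other", skills)]

-- ===== PORT B =====
-- Source B's _label: first bucket whose keyword occurs in skill.lower() (for-with-return = findSome?)
def labelB (skill : String) : Option String :=
  let skill_lower := PySem.Str.lower skill
  bucketMap.findSome? (fun bk =>
    if bk.2.any (fun kw => PySem.Str.isIn kw skill_lower) then some bk.1 else none)

-- Source B's `order` loop body
def ordStep (acc : List String) (p : Option String × String) : List String :=
  match p.1 with
  | some b => if acc.contains b then acc else acc ++ [b]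
  | none => acc

def auto_bucket_skills_py_alt (skills : List String) : List (String × List String) :=
  let labeled := skills.map (fun s => (labelB s, s))
  let order := labeled.foldl ordStep []
  let groups := order.map (fun b => (b, (labeled.filter (fun p => p.1 == some b)).map Prod.snd))
  let unmatched := (labeled.filter (fun p => p.1 == none)).map Prod.snd
  if unmatched ≠ [] ∨ groups = [] then groups ++ [("other", unmatched)] else groups

-- ===== PRECONDITION & SPEC =====
def Spec_auto_bucket_skills_py (skills : List String) (out : List (String × List String)) : Prop := out = auto_bucket_skills_py_alt skills
instance (skills : List String) (out : List (String × List String)) : Decidable (Spec_auto_bucket_skills_py skills out) := by unfold Spec_auto_bucket_skills_py; infer_instance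

-- ===== CLAIM (what is proved, stated in full; the proofs are below) =====
def Claim_equal_auto_bucket_skills_py : Prop := ∀ (skills : List String), Dom_auto_bucket_skills_py skills → Spec_auto_bucket_skills_py skills (auto_bucket_skills_py skills)

-- ===== LEMMAS AND PROOFS =====

-- proof-side names for B's intermediate values
def Lb (l : List String) : List (Option String × String) := l.map (fun s => (labelB s, s))
def ordOf (l : List String) : List String := (Lb l).foldl ordStep []
def grpVal (l : List String) (b : String) : List String :=
  ((Lb l).filter (fun p => p.1 == some b)).map Prod.snd
def Gof (l : List String) : List (String × List String) := (ordOf l).map (fun b => (b, grpVal l b))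
def Uof (l : List String) : List String := ((Lb l).filter (fun p => p.1 == none)).map Prod.snd

theorem alt_eq (skills : List String) :
    auto_bucket_skills_py_alt skills =
      if Uof skills ≠ [] ∨ Gof skills = [] then Gof skills ++ [("other", Uof skills)]
      else Gof skills := rfl

theorem firstBucketA_eq (sl : String) (l : List (String × List String)) :
    firstBucketA sl l = l.findSome? (fun bk =>
      if bk.2.any (fun kw => PySem.Str.isIn kw sl) then some bk.1 else none) := by
  induction l with
  | nil => rfl
  | cons hd tl ih =>
    obtain ⟨b, kws⟩ := hd
    simp only [firstBucketA, List.findSome?_cons]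
    split_ifs with h <;> simp [ih]

theorem labelA_eq (s : String) : firstBucketA (PySem.Str.lower s) bucketMap = labelB s := by
  rw [firstBucketA_eq]; rfl

theorem mem_foldl_ordStep (L : List (Option String × String)) :
    ∀ (acc : List String) (b : String),
      b ∈ L.foldl ordStep acc ↔ b ∈ acc ∨ some b ∈ L.map Prod.fst := by
  induction L with
  | nil => simp
  | cons p tl ih =>
    intro acc b
    obtain ⟨lb, s⟩ := p
    cases lb with
    | none => simp [ordStep, ih]
    | some c =>
      simp only [List.foldl_cons, List.map_cons, List.mem_cons, ih, ordStep]
      by_cases hc : c ∈ acc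
      · rw [if_pos (List.contains_iff_mem.mpr hc)]
        simp only [Option.some.injEq]
        constructor
        · tauto
        · rintro (h | h | h)
          · tauto
          · subst h; tauto
          · tauto
      · rw [if_neg (by simpa using hc)]
        simp only [List.mem_append, List.mem_singleton, Option.some.injEq]
        tauto

theorem mem_ordOf (l : List String) (b : String) :
    b ∈ ordOf l ↔ some b ∈ l.map labelB := by
  unfold ordOf Lb
  rw [mem_foldl_ordStep]
  simp [List.map_map, Function.comp_def]

theorem grpVal_nil_of_not_mem (l : List String) (b : String)
    (h : some b ∉ l.map labelB) : grpVal l b = [] := by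
  unfold grpVal Lb
  rw [List.map_eq_nil_iff, List.filter_eq_nil_iff]
  intro p hp
  simp only [List.mem_map] at hp
  obtain ⟨s', hs', rfl⟩ := hp
  simp only [beq_iff_eq]
  exact fun hc => h (List.mem_map.mpr ⟨s', hs', hc⟩)

theorem get?_mk_map (keys : List String) (f : String → List String) (b : String)
    (hb : b ∈ keys) :
    (PySem.Dict.mk (keys.map (fun k => (k, f k)))).get? b = some (f b) := by
  induction keys with
  | nil => cases hb
  | cons k tl ih =>
    rw [List.map_cons, PySem.Dict.get?_mk_cons]
    by_cases hk : k = b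
    · subst hk; simp
    · simp only [beq_iff_eq, hk, if_false]
      exact ih (by cases hb with | head => exact absurd rfl hk | tail _ h => exact h)

theorem get?_mkG (l : List String) (b : String) (hb : b ∈ ordOf l) :
    (PySem.Dict.mk (Gof l)).get? b = some (grpVal l b) := by
  unfold Gof
  exact get?_mk_map (ordOf l) (grpVal l) b hb

theorem contains_mkG (l : List String) (b : String) :
    (PySem.Dict.mk (Gof l)).contains b = decide (b ∈ ordOf l) := by
  rw [PySem.Dict.contains_eq_decide_mem_keys]
  congr 1
  simp [PySem.Dict.keys, Gof, List.map_map, Function.comp_def]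

theorem Lb_append (l : List String) (s : String) :
    Lb (l ++ [s]) = Lb l ++ [(labelB s, s)] := by simp [Lb]

theorem ordOf_append (l : List String) (s : String) :
    ordOf (l ++ [s]) = ordStep (ordOf l) (labelB s, s) := by
  unfold ordOf
  rw [Lb_append, List.foldl_append, List.foldl_cons, List.foldl_nil]

theorem grpVal_append (l : List String) (s b : String) :
    grpVal (l ++ [s]) b = grpVal l b ++ (if labelB s = some b then [s] else []) := by
  unfold grpVal
  rw [Lb_append, List.filter_append, List.map_append]
  congr 1
  by_cases h : labelB s = some b <;> simp [h]

theorem Uof_append (l : List String) (s : String) :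
    Uof (l ++ [s]) = Uof l ++ (if labelB s = none then [s] else []) := by
  unfold Uof
  rw [Lb_append, List.filter_append, List.map_append]
  congr 1
  cases h : labelB s <;> simp [h]

theorem Gof_append_none (l : List String) (s : String) (h : labelB s = none) :
    Gof (l ++ [s]) = Gof l := by
  unfold Gof
  rw [ordOf_append]
  simp only [ordStep, h]
  refine List.map_congr_left (fun b hb => ?_)
  rw [grpVal_append]
  simp [h]

theorem Gof_append_some_mem (l : List String) (s b : String) (h : labelB s = some b)
    (hb : b ∈ ordOf l) :
    Gof (l ++ [s]) = (Gof l).map (fun p => if p.1 == b then (b, grpVal l b ++ [s]) else p) := by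
  unfold Gof
  rw [ordOf_append]
  simp only [ordStep, h, if_pos (List.contains_iff_mem.mpr hb), List.map_map]
  refine List.map_congr_left (fun k hk => ?_)
  simp only [Function.comp_apply]
  by_cases hkb : k = b
  · subst hkb
    simp [grpVal_append, h]
  · have : (k == b) = false := by simpa using hkb
    simp only [this, Bool.false_eq_true, if_false]
    rw [grpVal_append]
    simp only [h, Option.some.injEq]
    rw [if_neg (fun he => hkb he.symm), List.append_nil]

theorem Gof_append_some_new (l : List String) (s b : String) (h : labelB s = some b)
    (hb : b ∉ ordOf l) :
    Gof (l ++ [s]) = Gof l ++ [(b, [s])] := by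
  unfold Gof
  rw [ordOf_append]
  simp only [ordStep, h]
  rw [if_neg (fun hc => hb (List.contains_iff_mem.mp hc))]
  rw [List.map_append, List.map_singleton]
  congr 1
  · refine List.map_congr_left (fun k hk => ?_)
    rw [grpVal_append]
    simp only [h, Option.some.injEq]
    rw [if_neg (fun he => hb (by rw [he]; exact hk)), List.append_nil]
  · rw [grpVal_append, grpVal_nil_of_not_mem l b (fun hm => hb ((mem_ordOf l b).mpr hm))]
    simp [h]

theorem invariant (l : List String) :
    l.foldl stepA (PySem.Dict.mk [], []) = (PySem.Dict.mk (Gof l), Uof l) := by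
  induction l using List.reverseRecOn with
  | nil => rfl
  | append_singleton l s ih =>
    rw [List.foldl_append, List.foldl_cons, List.foldl_nil, ih]
    show stepA (PySem.Dict.mk (Gof l), Uof l) s = _
    unfold stepA
    simp only [labelA_eq]
    cases h : labelB s with
    | none =>
      simp only
      rw [Gof_append_none l s h, Uof_append l s]
      simp [h]
    | some b =>
      simp only
      rw [Uof_append l s]
      simp only [h, reduceCtorEq, if_false, List.append_nil]
      refine Prod.ext ?_ rfl
      apply PySem.Dict.ext
      show ((PySem.Dict.mk (Gof l)).insert b
        ((PySem.Dict.mk (Gof l)).getD b [] ++ [s])).items = Gof (l ++ [s])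
      by_cases hb : b ∈ ordOf l
      · rw [PySem.Dict.getD_eq_get?_getD, get?_mkG l b hb]
        rw [PySem.Dict.items_insert]
        rw [if_pos (by rw [contains_mkG]; simpa using hb)]
        rw [Gof_append_some_mem l s b h hb]
        rfl
      · rw [PySem.Dict.getD_of_not_contains _ _ (by rw [contains_mkG]; simpa using hb)]
        rw [PySem.Dict.items_insert]
        rw [if_neg (by rw [contains_mkG]; simpa using hb)]
        rw [Gof_append_some_new l s b h hb]
        rfl

theorem labelB_bucket (s b : String) (h : labelB s = some b) :
    b ∈ bucketMap.map Prod.fst := by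
  unfold labelB at h
  obtain ⟨bk, hbk, hf⟩ := List.exists_of_findSome?_eq_some h
  refine List.mem_map.mpr ⟨bk, hbk, ?_⟩
  by_cases hc : bk.2.any (fun kw => PySem.Str.isIn kw (PySem.Str.lower s))
  · rw [if_pos hc] at hf
    exact (Option.some.injEq _ _ ▸ hf)
  · rw [if_neg hc] at hf
    cases hf

theorem other_not_mem_ordOf (l : List String) : "other" ∉ ordOf l := by
  intro hm
  obtain ⟨s, _, hs⟩ := List.mem_map.mp ((mem_ordOf l "other").mp hm)
  have := labelB_bucket s "other" hs
  revert this
  decide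

theorem not_both_nil (s : String) (rest : List String) :
    ¬ (Gof (s :: rest) = [] ∧ Uof (s :: rest) = []) := by
  rintro ⟨hg, hu⟩
  cases h : labelB s with
  | some b =>
    have hb : b ∈ ordOf (s :: rest) := (mem_ordOf _ b).mpr (by simp [h])
    rw [Gof, List.map_eq_nil_iff] at hg
    rw [hg] at hb
    cases hb
  | none =>
    have : (labelB s, s) ∈ Lb (s :: rest) := by simp [Lb]
    have hmem : s ∈ Uof (s :: rest) := by
      unfold Uof
      exact List.mem_map.mpr ⟨(labelB s, s), List.mem_filter.mpr ⟨this, by simp [h]⟩, rfl⟩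
    rw [hu] at hmem
    cases hmem

theorem ab_eq (skills : List String) :
    auto_bucket_skills_py skills = auto_bucket_skills_py_alt skills := by
  rw [alt_eq]
  unfold auto_bucket_skills_py
  simp only [invariant]
  by_cases hu : Uof skills = []
  · simp only [hu, ne_eq, not_true_eq_false, if_false, false_or]
    by_cases hg : Gof skills = []
    · have hnil : skills = [] := by
        cases skills with
        | nil => rfl
        | cons s rest => exact absurd ⟨hg, hu⟩ (not_both_nil s rest)
      subst hnil
      decide
    · simp [hg]
  · rw [if_pos hu]
    have hins : ((PySem.Dict.mk (Gof skills)).insert "other" (Uof skills)).items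
        = Gof skills ++ [("other", Uof skills)] := by
      rw [PySem.Dict.items_insert,
        if_neg (by rw [contains_mkG]; simpa using other_not_mem_ordOf skills)]
    rw [hins, if_pos (by simp), if_pos (by simp [hu])]

-- ===== VERDICT (by name: the statement is the Claim_ definition above) =====
theorem auto_bucket_skills_py_spec : Claim_equal_auto_bucket_skills_py := by
  intro skills _
  unfold Spec_auto_bucket_skills_py
  exact ab_eq skills
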